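-- pv_equiv track=rewrite | github.com/soob511/algostudy | 2024/0115_디펜스게임/PS_디펜스게임_김주은.py | solution
-- ===== SOURCE A (Python) =====
-- from queue import PriorityQueue
--
-- def solution(n, k, enemy):
--
--     pq = PriorityQueue()
--
--     for idx, e in enumerate(enemy, start=1):
--
--         pq.put((-e,e))
--         n-=e
--
--         if n<0:
--             if k>0:
--                 n+=pq.get()[1]
--                 k-=1
--             else:
--                 return idx-1
--
--     return len(enemy)
-- ===== SOURCE B (Python) =====
-- def solution(n, k, enemy):
--     # Segment-based: precompute prefix sums once; an outer loop (one iteration per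
--     # spent invincibility) locates the next failing round arithmetically
--     # (prefix_sum - refund_credit > n) and refunds the largest alive prefix wave.
--     P = [0]
--     for e in enemy:
--         P.append(P[-1] + e)
--     L = len(enemy)
--     pool = []     # alive (non-refunded) waves among enemy[:filled]
--     filled = 0
--     credit = 0    # total refunded so far
--     i = 1         # next round (1-based) whose balance must be checked
--     while True:
--         while i <= L and P[i] - credit <= n:
--             i += 1
--         if i > L:
--             return L
--         if k <= 0:
--             return i - 1
--         pool.extend(enemy[filled:i])
--         filled = i
--         m = max(pool)
--         pool.remove(m)
--         credit += m
--         k -= 1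
--         i += 1
-- ===== Notes on version B (the rewrite author's own statement) =====
-- stated objective: alternative
-- what changed: Replaces the per-enemy hp simulation with a thread-safe max-heap of (-e,e) pairs by a prefix-sum formulation: sums are precomputed once, an outer loop runs once per spent invincibility, an inner arithmetic scan on the prefix-sum array (prefix minus refund credit vs n) jumps to the next failing round, and the refund is the max of the alive prefix taken by a plain max/remove on a pool list.
import Mathlib
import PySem

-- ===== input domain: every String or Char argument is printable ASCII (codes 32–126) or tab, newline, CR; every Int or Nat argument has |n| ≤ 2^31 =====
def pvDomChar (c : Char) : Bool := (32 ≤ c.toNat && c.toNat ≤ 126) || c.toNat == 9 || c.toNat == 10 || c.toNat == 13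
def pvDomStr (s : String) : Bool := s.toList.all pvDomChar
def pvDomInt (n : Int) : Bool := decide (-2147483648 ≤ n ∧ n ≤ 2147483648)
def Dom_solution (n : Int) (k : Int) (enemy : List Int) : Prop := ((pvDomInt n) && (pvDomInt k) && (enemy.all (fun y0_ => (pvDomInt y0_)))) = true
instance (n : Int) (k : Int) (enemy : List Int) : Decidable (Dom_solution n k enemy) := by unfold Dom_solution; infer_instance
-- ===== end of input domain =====

-- B replaces A's per-enemy hp simulation with a max-heap by a prefix-sum formulation:
-- one outer iteration per spent invincibility, an inner arithmetic scan on the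
-- precomputed prefix sums locating the next failing round; objective: alternative.

-- ===== PORT A =====
-- PriorityQueue is ported as the list of queued (-e, e) pairs in insertion order;
-- pq.get() extracts the first occurrence of the lexicographically least pair (the heap contract).
def pqPopMin : List (Int × Int) → (Int × Int) × List (Int × Int)
  | [] => ((0, 0), [])      -- unreachable: A only calls get() right after a put()
  | [p] => (p, [])
  | p :: q :: rest =>
      let g := pqPopMin (q :: rest)
      if p.1 < g.1.1 ∨ (p.1 = g.1.1 ∧ p.2 ≤ g.1.2) then (p, q :: rest)
      else (g.1, p :: g.2)

-- the for-loop over enumerate(enemy, start=1); `total` is len(enemy) for the final return;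
-- per iteration: pq.put((-e,e)) = pq ++ [(-e,e)], n -= e, then the n<0 / k>0 branches
def solutionGo : List Int → Int → Int → Int → List (Int × Int) → Int → Int
  | [], _, _, _, _, total => total
  | e :: rest, idx, n, k, pq, total =>
      if n - e < 0 then
        if k > 0 then
          solutionGo rest (idx + 1) (n - e + (pqPopMin (pq ++ [(-e, e)])).1.2) (k - 1)
            (pqPopMin (pq ++ [(-e, e)])).2 total
        else idx - 1
      else solutionGo rest (idx + 1) (n - e) k (pq ++ [(-e, e)]) total

def solution (n : Int) (k : Int) (enemy : List Int) : Int :=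
  solutionGo enemy 1 n k [] enemy.length

-- ===== PORT B =====
-- the P-building for-loop: P = [0]; for e in enemy: P.append(P[-1] + e)
def buildP (acc : List Int) : List Int → List Int
  | [] => acc
  | e :: rest => buildP (acc ++ [acc.getLastD 0 + e]) rest

-- the inner while: while i <= L and P[i] - credit <= n: i += 1
-- (P[i] is always in range there since i ≤ L < len(P); getD is exact on that range)
def scanB (P : List Int) (L : Nat) (n credit : Int) (i : Nat) : Nat :=
  if i ≤ L ∧ P.getD i 0 - credit ≤ n then scanB P L n credit (i + 1) else i
termination_by L + 1 - i
decreasing_by rename_i h; omega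

-- the outer while True loop of Source B; max(pool')/pool'.remove(m) are PySem.List.max?/
-- remove?; the .getD fallbacks are unreachable (pool' is nonempty and m ∈ pool')
def outerB (P enemy : List Int) (L : Nat) (n : Int) : Int → List Int → Nat → Int → Nat → Int
  | k, pool, filled, credit, i =>
      let j := scanB P L n credit i
      if j > L then (L : Int)
      else if k ≤ 0 then (j : Int) - 1
      else
        let pool' := pool ++ ((enemy.drop filled).take (j - filled))
        let m := (PySem.List.max? pool' (fun x => x)).getD 0
        outerB P enemy L n (k - 1) ((PySem.List.remove? pool' m).getD pool') j (credit + m) (j + 1)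
termination_by k => k.toNat
decreasing_by omega

def solution_alt (n : Int) (k : Int) (enemy : List Int) : Int :=
  outerB (buildP [0] enemy) enemy enemy.length n k [] 0 0 1

-- ===== PRECONDITION & SPEC =====
def Spec_solution (n : Int) (k : Int) (enemy : List Int) (out : Int) : Prop := out = solution_alt n k enemy
instance (n : Int) (k : Int) (enemy : List Int) (out : Int) : Decidable (Spec_solution n k enemy out) := by unfold Spec_solution; infer_instance

-- ===== CLAIM (what is proved, stated in full; the proofs are below) =====
def Claim_equal_solution : Prop := ∀ (n : Int) (k : Int) (enemy : List Int), Dom_solution n k enemy → Spec_solution n k enemy (solution n k enemy)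

-- ===== LEMMAS AND PROOFS =====

lemma pqPopMin_sub : ∀ (pq : List (Int × Int)), ∀ p ∈ (pqPopMin pq).2, p ∈ pq
  | [] => by simp [pqPopMin]
  | [q] => by simp [pqPopMin]
  | q :: r :: rest => by
      have ih := pqPopMin_sub (r :: rest)
      simp only [pqPopMin]
      split
      · intro p hp
        exact List.mem_cons_of_mem _ hp
      · intro p hp
        rcases List.mem_cons.mp hp with h | h
        · simp [h]
        · exact List.mem_cons_of_mem _ (ih p h)

lemma pqPopMin_spec : ∀ (pq : List (Int × Int)), pq ≠ [] → (∀ p ∈ pq, p.1 = -p.2) →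
    (pqPopMin pq).1 ∈ pq ∧
    (∀ x ∈ pq.map Prod.snd, x ≤ (pqPopMin pq).1.2) ∧
    (pq.map Prod.snd).Perm ((pqPopMin pq).1.2 :: ((pqPopMin pq).2.map Prod.snd))
  | [], h, _ => absurd rfl h
  | [p], _, _ => by simp [pqPopMin]
  | p :: q :: rest, _, hform => by
      obtain ⟨ihmem, ihmax, ihperm⟩ :=
        pqPopMin_spec (q :: rest) (by simp)
          (fun r hr => hform r (List.mem_cons_of_mem _ hr))
      have hp : p.1 = -p.2 := hform p (by simp)
      have hg : (pqPopMin (q :: rest)).1.1 = -(pqPopMin (q :: rest)).1.2 :=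
        hform _ (List.mem_cons_of_mem _ ihmem)
      simp only [pqPopMin]
      split
      · rename_i hle
        dsimp only
        have hvg : (pqPopMin (q :: rest)).1.2 ≤ p.2 := by omega
        refine ⟨by simp, ?_, by simp⟩
        intro x hx
        rw [List.map_cons] at hx
        rcases List.mem_cons.mp hx with hx | hx
        · omega
        · exact le_trans (ihmax x hx) hvg
      · rename_i hle
        dsimp only
        have hvg : p.2 ≤ (pqPopMin (q :: rest)).1.2 := by omega
        refine ⟨List.mem_cons_of_mem _ ihmem, ?_, ?_⟩
        · intro x hx
          rw [List.map_cons] at hx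
          rcases List.mem_cons.mp hx with hx | hx
          · omega
          · exact ihmax x hx
        · rw [List.map_cons, List.map_cons]
          exact (ihperm.cons p.2).trans (List.Perm.swap _ _ _)

lemma buildP_getD_lt : ∀ (rest acc : List Int) (idx : Nat), idx < acc.length →
    (buildP acc rest).getD idx 0 = acc.getD idx 0
  | [], acc, idx, _ => rfl
  | e :: r, acc, idx, h => by
      rw [buildP]
      rw [buildP_getD_lt r _ idx (by simp only [List.length_append, List.length_cons, List.length_nil]; omega)]
      rw [List.getD_eq_getElem?_getD, List.getD_eq_getElem?_getD,
        List.getElem?_append_left h]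

lemma buildP_getD : ∀ (rest acc : List Int), acc ≠ [] → ∀ (j : Nat), j ≤ rest.length →
    (buildP acc rest).getD (acc.length - 1 + j) 0 = acc.getLastD 0 + (rest.take j).sum
  | [], acc, hne, j, hj => by
      have hj0 : j = 0 := by simpa using hj
      subst hj0
      rw [buildP]
      simp only [List.take_nil, List.sum_nil, add_zero]
      cases acc with
      | nil => exact absurd rfl hne
      | cons a t =>
          rw [List.getD_eq_getElem?_getD, List.getLastD_eq_getLast?,
            List.getLast?_eq_getElem?]
  | e :: r, acc, hne, j, hj => by
      have hlen : 1 ≤ acc.length := by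
        cases acc with
        | nil => exact absurd rfl hne
        | cons a t => simp
      rw [buildP]
      cases j with
      | zero =>
          simp only [List.take_zero, List.sum_nil, add_zero]
          rw [buildP_getD_lt r _ _ (by simp only [List.length_append, List.length_cons, List.length_nil]; omega)]
          rw [List.getD_eq_getElem?_getD, List.getElem?_append_left (by omega)]
          rw [List.getLastD_eq_getLast?, List.getLast?_eq_getElem?]
      | succ j' =>
          have h1 : acc.length - 1 + (j' + 1) = (acc ++ [acc.getLastD 0 + e]).length - 1 + j' := by
            simp; omega
          rw [h1, buildP_getD r _ (by simp) j' (by simpa using hj)]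
          simp
          ring

lemma P_getD (enemy : List Int) (i : Nat) (h : i ≤ enemy.length) :
    (buildP [0] enemy).getD i 0 = (enemy.take i).sum := by
  have := buildP_getD enemy [0] (by simp) i (by simpa using h)
  simpa using this

lemma outerB_eq_of_scan (P enemy : List Int) (L : Nat) (n k credit : Int)
    (pool : List Int) (filled : Nat) (i i' : Nat)
    (h : scanB P L n credit i = scanB P L n credit i') :
    outerB P enemy L n k pool filled credit i = outerB P enemy L n k pool filled credit i' := by
  conv_lhs => rw [outerB]
  conv_rhs => rw [outerB]
  rw [h]

lemma scanB_cont (P : List Int) (L : Nat) (n credit : Int) (i : Nat)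
    (h : i ≤ L ∧ P.getD i 0 - credit ≤ n) :
    scanB P L n credit i = scanB P L n credit (i + 1) := by
  conv_lhs => rw [scanB]
  rw [if_pos h]

lemma scanB_stop (P : List Int) (L : Nat) (n credit : Int) (i : Nat)
    (h : ¬(i ≤ L ∧ P.getD i 0 - credit ≤ n)) :
    scanB P L n credit i = i := by
  rw [scanB, if_neg h]

lemma outerB_stop (P enemy : List Int) (L : Nat) (n k credit : Int) (pool : List Int)
    (filled i : Nat) (h : scanB P L n credit i > L) :
    outerB P enemy L n k pool filled credit i = (L : Int) := by
  rw [outerB, if_pos h]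

lemma outerB_ret (P enemy : List Int) (L : Nat) (n k credit : Int) (pool : List Int)
    (filled i j : Nat) (hj : scanB P L n credit i = j) (hjL : ¬ j > L) (hk : k ≤ 0) :
    outerB P enemy L n k pool filled credit i = (j : Int) - 1 := by
  conv_lhs => rw [outerB]
  simp only [hj]
  rw [if_neg hjL, if_pos hk]

lemma outerB_refund (P enemy : List Int) (L : Nat) (n k credit : Int) (pool : List Int)
    (filled i j : Nat) (hj : scanB P L n credit i = j) (hjL : ¬ j > L) (hk : ¬ k ≤ 0) :
    outerB P enemy L n k pool filled credit i =
      outerB P enemy L n (k - 1)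
        ((PySem.List.remove? (pool ++ ((enemy.drop filled).take (j - filled)))
            ((PySem.List.max? (pool ++ ((enemy.drop filled).take (j - filled))) (fun x => x)).getD 0)).getD
          (pool ++ ((enemy.drop filled).take (j - filled))))
        j (credit + (PySem.List.max? (pool ++ ((enemy.drop filled).take (j - filled))) (fun x => x)).getD 0)
        (j + 1) := by
  conv_lhs => rw [outerB]
  simp only [hj]
  rw [if_neg hjL, if_neg hk]

lemma seg_lockstep (n0 : Int) (enemy : List Int) :
    ∀ (rest : List Int) (i : Nat) (hpA k credit : Int) (pq : List (Int × Int))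
      (pool : List Int) (filled : Nat),
    enemy.drop i = rest →
    filled ≤ i → i ≤ enemy.length →
    (∀ p ∈ pq, p.1 = -p.2) →
    hpA = n0 - (enemy.take i).sum + credit →
    (pq.map Prod.snd).Perm (pool ++ ((enemy.take i).drop filled)) →
    solutionGo rest ((i : Int) + 1) hpA k pq enemy.length
      = outerB (buildP [0] enemy) enemy enemy.length n0 k pool filled credit (i + 1) := by
  intro rest
  induction rest with
  | nil =>
      intro i hpA k credit pq pool filled hdrop hfil hiL hform hhp hperm
      have hi : i = enemy.length := by
        have := List.drop_eq_nil_iff.mp hdrop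
        omega
      subst hi
      have hscan : scanB (buildP [0] enemy) enemy.length n0 credit (enemy.length + 1)
          = enemy.length + 1 :=
        scanB_stop _ _ _ _ _ (fun hc => by omega)
      rw [outerB_stop _ _ _ _ _ _ _ _ _ (by omega : scanB (buildP [0] enemy) enemy.length n0 credit (enemy.length + 1) > enemy.length)]
      simp [solutionGo]
  | cons e rest' ih =>
      intro i hpA k credit pq pool filled hdrop hfil hiL hform hhp hperm
      have hi : i < enemy.length := by
        by_contra hge
        rw [not_lt] at hge
        rw [List.drop_eq_nil_iff.mpr hge] at hdrop
        exact (List.cons_ne_nil e rest') hdrop.symm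
      have he : enemy[i] = e := by
        have h1 : (enemy.drop i)[0]? = enemy[i + 0]? := List.getElem?_drop
        rw [hdrop] at h1
        have h0 : enemy[i]? = some e := by simpa using h1.symm
        rw [List.getElem?_eq_getElem hi] at h0
        exact Option.some.inj h0
      have hdrop' : enemy.drop (i + 1) = rest' := by
        have h2 : (enemy.drop i).drop 1 = enemy.drop (i + 1) := List.drop_drop
        rw [hdrop] at h2
        simpa using h2.symm
      have hsum : (enemy.take (i + 1)).sum = (enemy.take i).sum + e := by
        rw [List.take_add_one]
        simp [List.getElem?_eq_getElem hi, he]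
      have hP : (buildP [0] enemy).getD (i + 1) 0 = (enemy.take (i + 1)).sum :=
        P_getD enemy (i + 1) (by omega)
      have hsplit : (enemy.take (i + 1)).drop filled = (enemy.take i).drop filled ++ [e] := by
        have ht : enemy.take (i + 1) = enemy.take i ++ [e] := by
          rw [List.take_add_one]
          simp [List.getElem?_eq_getElem hi, he]
        rw [ht, List.drop_append]
        have : filled - (enemy.take i).length = 0 := by
          simp [List.length_take]
          omega
        rw [this]
        simp
      show solutionGo (e :: rest') ((i : Int) + 1) hpA k pq (enemy.length : Int) = _
      simp only [solutionGo]
      by_cases hdef : hpA - e < 0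
      · -- deficit round: the inner scan stops at i+1
        rw [if_pos hdef]
        have hcondF : ¬(i + 1 ≤ enemy.length ∧
            (buildP [0] enemy).getD (i + 1) 0 - credit ≤ n0) := by
          intro hc
          rw [hP, hsum] at hc
          omega
        have hscan : scanB (buildP [0] enemy) enemy.length n0 credit (i + 1) = i + 1 :=
          scanB_stop _ _ _ _ _ hcondF
        by_cases hk : k > 0
        · rw [if_pos hk]
          -- A refunds the max; B does the pool extend / max / remove step
          have hform1 : ∀ p ∈ pq ++ [(-e, e)], p.1 = -p.2 := by
            intro p hp
            rcases List.mem_append.mp hp with h | h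
            · exact hform p h
            · simp at h; subst h; simp
          obtain ⟨gmem, gmax, gperm⟩ := pqPopMin_spec (pq ++ [(-e, e)]) (by simp) hform1
          have hpool'eq : (enemy.drop filled).take (i + 1 - filled)
              = (enemy.take (i + 1)).drop filled := by
            rw [List.drop_take]
          have hpermP : ((pq ++ [(-e, e)]).map Prod.snd).Perm
              (pool ++ (enemy.drop filled).take (i + 1 - filled)) := by
            rw [hpool'eq, hsplit]
            have h1 : ((pq ++ [(-e, e)]).map Prod.snd) = pq.map Prod.snd ++ [e] := by simp
            rw [h1, ← List.append_assoc]
            exact hperm.append_right [e]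
          set pool' := pool ++ (enemy.drop filled).take (i + 1 - filled) with hpool'
          have hgmem : (pqPopMin (pq ++ [(-e, e)])).1.2 ∈ pool' :=
            hpermP.mem_iff.mp (List.mem_map.mpr ⟨_, gmem, rfl⟩)
          obtain ⟨mv, hmv⟩ : ∃ mv, PySem.List.max? pool' (fun x => x) = some mv := by
            cases hq : PySem.List.max? pool' (fun x => x) with
            | none =>
                rw [PySem.List.max?_eq_none_iff] at hq
                rw [hq] at hgmem
                simp at hgmem
            | some mv => exact ⟨mv, rfl⟩
          have hmvmem : mv ∈ pool' := PySem.List.max?_mem hmv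
          have hmveq : mv = (pqPopMin (pq ++ [(-e, e)])).1.2 := by
            have h1 : mv ≤ (pqPopMin (pq ++ [(-e, e)])).1.2 :=
              gmax mv (hpermP.symm.mem_iff.mp hmvmem)
            have h2 : (pqPopMin (pq ++ [(-e, e)])).1.2 ≤ mv :=
              PySem.List.max?_isMax hmv _ hgmem
            omega
          have hrem : PySem.List.remove? pool' mv = some (pool'.erase mv) :=
            PySem.List.remove?_eq_some_erase pool' mv hmvmem
          have hpermE : pool'.Perm (mv :: pool'.erase mv) := List.perm_cons_erase hmvmem
          have hperm2 : (((pqPopMin (pq ++ [(-e, e)])).2).map Prod.snd).Perm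
              (pool'.erase mv) := by
            have hA := hpermP.trans hpermE
            have gperm' : ((pq ++ [(-e, e)]).map Prod.snd).Perm
                (mv :: ((pqPopMin (pq ++ [(-e, e)])).2).map Prod.snd) := by
              rw [hmveq]; exact gperm
            exact (gperm'.symm.trans hA).cons_inv
          have hform2 : ∀ p ∈ (pqPopMin (pq ++ [(-e, e)])).2, p.1 = -p.2 :=
            fun p hp => hform1 p (pqPopMin_sub (pq ++ [(-e, e)]) p hp)
          rw [outerB_refund _ _ _ _ _ _ _ _ _ (i + 1) hscan (by omega) (by omega)]
          rw [← hpool', hmv]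
          simp only [Option.getD_some, hrem]
          rw [← hmveq]
          have hrec := ih (i + 1) (hpA - e + mv) (k - 1)
            (credit + mv) (pqPopMin (pq ++ [(-e, e)])).2 (pool'.erase mv) (i + 1)
            hdrop' (by omega) (by omega) hform2 (by rw [hhp, hsum]; ring)
            (by
              have hz : (enemy.take (i + 1)).drop (i + 1) = [] := by
                apply List.drop_eq_nil_iff.mpr
                simp
              rw [hz, List.append_nil]
              exact hperm2)
          have hc : ((i : Int) + 1) + 1 = ((i + 1 : Nat) : Int) + 1 := by push_cast; ring
          rw [hc]
          exact hrec
        · rw [if_neg hk]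
          rw [outerB_ret _ _ _ _ _ _ _ _ _ (i + 1) hscan (by omega) (by omega)]
          push_cast
          ring
      · -- no deficit: A keeps going, B's inner scan advances past round i+1
        rw [if_neg hdef]
        have hcond : i + 1 ≤ enemy.length ∧
            (buildP [0] enemy).getD (i + 1) 0 - credit ≤ n0 := by
          refine ⟨by omega, ?_⟩
          rw [hP, hsum]
          omega
        rw [outerB_eq_of_scan _ _ _ _ _ _ _ _ _ (i + 2) (scanB_cont _ _ _ _ _ hcond)]
        have hform1 : ∀ p ∈ pq ++ [(-e, e)], p.1 = -p.2 := by
          intro p hp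
          rcases List.mem_append.mp hp with h | h
          · exact hform p h
          · simp at h; subst h; simp
        have hperm1 : ((pq ++ [(-e, e)]).map Prod.snd).Perm
            (pool ++ (enemy.take (i + 1)).drop filled) := by
          rw [hsplit]
          have h1 : ((pq ++ [(-e, e)]).map Prod.snd) = pq.map Prod.snd ++ [e] := by simp
          rw [h1, ← List.append_assoc]
          exact hperm.append_right [e]
        have hrec := ih (i + 1) (hpA - e) k credit (pq ++ [(-e, e)]) pool filled
          hdrop' (by omega) (by omega) hform1 (by rw [hhp, hsum]; ring) hperm1
        have hc : ((i : Int) + 1) + 1 = ((i + 1 : Nat) : Int) + 1 := by push_cast; ring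
        rw [hc]
        exact hrec

-- ===== VERDICT (by name: the statement is the Claim_ definition above) =====
theorem solution_spec : Claim_equal_solution := by
  intro n k enemy _
  unfold Spec_solution solution solution_alt
  have h := seg_lockstep n enemy enemy 0 n k 0 [] [] 0 (by simp) (by omega) (by omega)
    (by simp) (by simp) (by simp)
  simpa using h
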